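-- pv_equiv track=rewrite | github.com/arusli1/MCM-Data-With-The-Stars | AR-Problem2/problem2_utils.py | infer_elim_week_from_placement
-- ===== SOURCE A (Python) =====
-- from typing import List, Optional, Tuple
--
-- def infer_elim_week_from_placement(
--     placement: List[Optional[int]], schedule: List[int],
-- ) -> List[int]:
--     """Assign elimination weeks from placement order and weekly schedule."""
--     W = len(schedule) - 1
--     elim = [W + 1] * len(placement)
--     ranked = [(p, i) for i, p in enumerate(placement) if p is not None and p > 0]
--     ranked.sort(reverse=True)
--     idx = 0
--     for w in range(1, W + 1):
--         for _ in range(schedule[w] if w < len(schedule) else 0):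
--             if idx >= len(ranked):
--                 break
--             _, i = ranked[idx]
--             elim[i] = w
--             idx += 1
--     return elim
-- ===== SOURCE B (Python) =====
-- def infer_elim_week_from_placement(placement, schedule):
--     """Assign elimination weeks: prefix sums of the weekly capacities + a binary
--     search map each rank position directly to its week (no slot consumption)."""
--     W = len(schedule) - 1
--     # cum[w] = total elimination capacity of weeks 1..w (negative capacities count 0)
--     cum = [0]
--     for w in range(1, W + 1):
--         cum.append(cum[-1] + max(schedule[w], 0))
--     ranked = sorted(((p, i) for i, p in enumerate(placement) if p is not None and p > 0),
--                     reverse=True)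
--     elim = [W + 1] * len(placement)
--     for k, (_, i) in enumerate(ranked):
--         # first w with cum[w] > k (hand-rolled bisect_right: A imports no bisect)
--         lo, hi = 0, len(cum)
--         while lo < hi:
--             mid = (lo + hi) // 2
--             if cum[mid] <= k:
--                 lo = mid + 1
--             else:
--                 hi = mid
--         if lo <= W:
--             elim[i] = lo
--     return elim
-- ===== Notes on version B (the rewrite author's own statement) =====
-- stated objective: alternative
-- what changed: A consumes week slots sequentially with nested week/capacity loops and a mutable cursor; B instead builds prefix sums of the weekly capacities and maps each rank position directly to its week with a hand-rolled binary search (bisect_right), skipping ranks beyond the total capacity.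
import Mathlib
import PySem

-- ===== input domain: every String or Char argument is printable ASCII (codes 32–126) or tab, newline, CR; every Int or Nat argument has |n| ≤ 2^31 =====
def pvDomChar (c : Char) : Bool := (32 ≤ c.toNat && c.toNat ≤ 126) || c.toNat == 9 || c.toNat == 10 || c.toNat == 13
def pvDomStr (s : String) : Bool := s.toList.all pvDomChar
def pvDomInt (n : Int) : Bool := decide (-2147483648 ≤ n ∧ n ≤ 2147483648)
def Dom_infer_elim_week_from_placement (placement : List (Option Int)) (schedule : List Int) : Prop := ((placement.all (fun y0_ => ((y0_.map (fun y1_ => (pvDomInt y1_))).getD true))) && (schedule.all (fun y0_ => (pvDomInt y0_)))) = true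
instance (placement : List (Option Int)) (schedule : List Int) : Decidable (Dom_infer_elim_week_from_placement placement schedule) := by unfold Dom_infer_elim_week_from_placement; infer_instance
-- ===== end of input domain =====

-- B replaces A's sequential consumption of week slots (nested week/capacity loops with a
-- mutable cursor) by prefix sums of the weekly capacities and a binary search mapping each
-- rank position directly to its week; objective: alternative algorithm.

-- ===== PORT A =====
-- inner 'for _ in range(...)' loop of A, with its 'break' on idx >= len(ranked);
-- idx is a Nat cursor (Python's idx starts at 0 and only increments, so values coincide)
def pvInnerA (ranked : List (Int × Int)) (w : Int) : Nat → List Int × Nat → List Int × Nat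
  | 0, st => st
  | Nat.succ n, (elim, idx) =>
    if idx ≥ ranked.length then (elim, idx)
    else
      -- ranked[idx]; exact: idx < ranked.length in this branch, default never used
      let pi := ranked.getD idx (0, 0)
      -- elim[i] = w; exact: i comes from enumerate so 0 ≤ i < len(elim)
      pvInnerA ranked w n (elim.set pi.2.toNat w, idx + 1)

def infer_elim_week_from_placement (placement : List (Option Int)) (schedule : List Int) : List Int :=
  let W : Int := (schedule.length : Int) - 1
  let elim : List Int := List.replicate placement.length (W + 1)
  let ranked0 := (PySem.List.enumerate placement).filterMap (fun ip =>
      match ip.2 with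
      | some p => if p > 0 then some (p, ip.1) else none
      | none => none)
  let ranked := PySem.List.sorted2 ranked0 (fun x => x.1) (fun x => x.2) true
  -- range(schedule[w] if w < len(schedule) else 0) iterates toNat-many times;
  -- schedule[w]: w ∈ range(1,W+1) is in range, so pyGet?'s default is never used
  let st := (PySem.List.pyRange 1 (W + 1) 1).foldl (fun st w =>
      pvInnerA ranked w ((if w < (schedule.length : Int) then (PySem.List.pyGet? schedule w).getD 0 else 0)).toNat st) (elim, 0)
  st.1

-- ===== PORT B =====
-- Source B's cum loop: 'cum = [0]; for w in range(1, W+1): cum.append(cum[-1] + max(schedule[w], 0))'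
-- cum[-1] is pyGet? at -1 (cum is never empty); schedule[w]: 1 ≤ w ≤ W < len on every iteration
def pvCumB (schedule : List Int) (W : Int) : List Int :=
  (PySem.List.pyRange 1 (W + 1) 1).foldl
    (fun cum w => cum ++ [(PySem.List.pyGet? cum (-1)).getD 0 + max ((PySem.List.pyGet? schedule w).getD 0) 0])
    [0]

-- Source B's hand-rolled bisect_right while-loop; lo, hi, mid are nonnegative Python ints,
-- kept as Nat ((lo+hi)//2 on nonnegative ints = Nat division, exact)
def pvBisB (cum : List Int) (k : Int) (lo hi : Nat) : Nat :=
  if _h : lo < hi then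
    if (PySem.List.pyGet? cum (((lo + hi) / 2 : Nat) : Int)).getD 0 ≤ k then
      pvBisB cum k ((lo + hi) / 2 + 1) hi
    else pvBisB cum k lo ((lo + hi) / 2)
  else lo
  termination_by hi - lo
  decreasing_by all_goals omega

-- 'for k, (_, i) in enumerate(ranked): …' — k is the enumerate counter (Nat, starts at 0)
def pvLoopB (cum : List Int) (W : Int) : List (Int × Int) → Nat → List Int → List Int
  | [], _, elim => elim
  | pi :: rest, k, elim =>
    let w := pvBisB cum (k : Int) 0 cum.length
    pvLoopB cum W rest (k + 1) (if (w : Int) ≤ W then elim.set pi.2.toNat (w : Int) else elim)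

def infer_elim_week_from_placement_alt (placement : List (Option Int)) (schedule : List Int) : List Int :=
  let W : Int := (schedule.length : Int) - 1
  let cum := pvCumB schedule W
  let ranked := PySem.List.sorted2 ((PySem.List.enumerate placement).filterMap (fun ip =>
      match ip.2 with
      | some p => if p > 0 then some (p, ip.1) else none
      | none => none)) (fun x => x.1) (fun x => x.2) true
  let elim : List Int := List.replicate placement.length (W + 1)
  pvLoopB cum W ranked 0 elim

-- ===== PRECONDITION & SPEC =====
def Spec_infer_elim_week_from_placement (placement : List (Option Int)) (schedule : List Int) (out : List Int) : Prop := out = infer_elim_week_from_placement_alt placement schedule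
instance (placement : List (Option Int)) (schedule : List Int) (out : List Int) : Decidable (Spec_infer_elim_week_from_placement placement schedule out) := by unfold Spec_infer_elim_week_from_placement; infer_instance

-- ===== CLAIM (what is proved, stated in full; the proofs are below) =====
def Claim_equal_infer_elim_week_from_placement : Prop := ∀ (placement : List (Option Int)) (schedule : List Int), Dom_infer_elim_week_from_placement placement schedule → Spec_infer_elim_week_from_placement placement schedule (infer_elim_week_from_placement placement schedule)

-- ===== LEMMAS AND PROOFS =====

-- capacity of week w as a Nat (range(schedule[w]) iterates this many times)
def pvCnt (schedule : List Int) (w : Int) : Nat := ((PySem.List.pyGet? schedule w).getD 0).toNat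

-- total capacity of the first j weeks of the week list ws
def pvT (schedule : List Int) (ws : List Int) (j : Nat) : Nat :=
  ((ws.take j).map (pvCnt schedule)).sum

-- the flat slot list: week w repeated (capacity of w) times, in week order
def pvSlots (schedule : List Int) (ws : List Int) : List Int :=
  ws.flatMap (fun w => List.replicate (pvCnt schedule w) w)

-- mathematical form of Source B's cum list, built structurally over the week list
def pvCums (schedule : List Int) : List Int → Int → List Int
  | [], s => [s]
  | w :: ws, s => s :: pvCums schedule ws (s + max ((PySem.List.pyGet? schedule w).getD 0) 0)

theorem pvT_zero (schedule ws) : pvT schedule ws 0 = 0 := rfl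

theorem pvT_succ (schedule : List Int) (ws : List Int) (j : Nat) (h : j < ws.length) :
    pvT schedule ws (j + 1) = pvT schedule ws j + pvCnt schedule (ws.getD j 0) := by
  unfold pvT
  rw [List.take_add_one, List.getElem?_eq_getElem h, List.map_append, List.sum_append,
    List.getD_eq_getElem?_getD, List.getElem?_eq_getElem h]
  simp

theorem pvT_mono (schedule : List Int) (ws : List Int) {i j : Nat} (h : i ≤ j) :
    pvT schedule ws i ≤ pvT schedule ws j := by
  unfold pvT
  have : ws.take j = ws.take i ++ (ws.take j).drop i := by
    conv_lhs => rw [← List.take_append_drop i (ws.take j)]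
    rw [List.take_take, Nat.min_eq_left h]
  rw [this, List.map_append, List.sum_append]
  exact Nat.le_add_right _ _

theorem pvSlots_length (schedule : List Int) (ws : List Int) :
    (pvSlots schedule ws).length = pvT schedule ws ws.length := by
  unfold pvSlots pvT
  rw [List.take_length]
  simp

theorem pvSlots_getD (schedule : List Int) : ∀ (ws : List Int) (j d : Nat),
    j < ws.length → d < pvCnt schedule (ws.getD j 0) →
    (pvSlots schedule ws).getD (pvT schedule ws j + d) 0 = ws.getD j 0 := by
  intro ws
  induction ws with
  | nil => intro j d h _; simp at h
  | cons w ws ih =>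
    intro j d hj hd
    cases j with
    | zero =>
      simp only [List.getD_cons_zero] at hd ⊢
      rw [pvSlots, List.flatMap_cons, pvT_zero, Nat.zero_add,
        List.getD_append _ _ _ _ (by simpa using hd)]
      simp [List.getD_eq_getElem?_getD, hd]
    | succ j =>
      have hj' : j < ws.length := by simpa using hj
      have hT : pvT schedule (w :: ws) (j + 1) = pvCnt schedule w + pvT schedule ws j := by
        unfold pvT; simp [List.take_succ_cons]
      simp only [List.getD_cons_succ] at hd ⊢
      rw [pvSlots, List.flatMap_cons, hT,
        List.getD_append_right _ _ _ _ (by simp; omega)]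
      have : pvCnt schedule w + pvT schedule ws j + d - (List.replicate (pvCnt schedule w) w).length
          = pvT schedule ws j + d := by simp; omega
      rw [this]
      exact ih j d hj' hd

theorem pvCums_length (schedule : List Int) : ∀ (ws : List Int) (s : Int),
    (pvCums schedule ws s).length = ws.length + 1 := by
  intro ws; induction ws with
  | nil => intro s; rfl
  | cons w ws ih => intro s; simp [pvCums, ih]

theorem pvCums_getD (schedule : List Int) : ∀ (ws : List Int) (s : Int) (j : Nat),
    j ≤ ws.length → (pvCums schedule ws s).getD j 0 = s + (pvT schedule ws j : Int) := by
  intro ws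
  induction ws with
  | nil =>
    intro s j h
    have hj0 : j = 0 := by simpa using h
    subst hj0; simp [pvCums, pvT]
  | cons w ws ih =>
    intro s j hj
    cases j with
    | zero => simp [pvCums, pvT]
    | succ j =>
      have hj' : j ≤ ws.length := by simpa using hj
      have hT : pvT schedule (w :: ws) (j + 1) = pvCnt schedule w + pvT schedule ws j := by
        unfold pvT; simp [List.take_succ_cons]
      rw [pvCums, List.getD_cons_succ, ih _ j hj', hT]
      have hmax : max ((PySem.List.pyGet? schedule w).getD 0) 0
          = ((pvCnt schedule w : Nat) : Int) := by
        rw [pvCnt, Int.toNat_eq_max]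
      rw [hmax]
      push_cast
      ring

-- Source B's fold building cum equals the structural pvCums
theorem pvCumB_eq_cums (schedule : List Int) (W : Int) :
    pvCumB schedule W = pvCums schedule (PySem.List.pyRange 1 (W + 1) 1) 0 := by
  unfold pvCumB
  suffices h : ∀ (L : List Int) (init : List Int) (s : Int),
      L.foldl (fun cum w => cum ++ [(PySem.List.pyGet? cum (-1)).getD 0 + max ((PySem.List.pyGet? schedule w).getD 0) 0]) (init ++ [s])
        = init ++ pvCums schedule L s by
    simpa using h (PySem.List.pyRange 1 (W + 1) 1) [] 0
  intro L
  induction L with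
  | nil => intro init s; simp [pvCums]
  | cons w L ih =>
    intro init s
    simp only [List.foldl_cons, PySem.List.pyGet?_neg_one_append_singleton, Option.getD_some]
    rw [ih]
    simp [pvCums]

-- the binary-search invariant: pvBisB returns the boundary index between values ≤ k and > k
theorem pvBisB_spec (cum : List Int) (k : Int)
    (mono : ∀ i j : Nat, i ≤ j → j < cum.length → cum.getD i 0 ≤ cum.getD j 0) :
    ∀ lo hi : Nat, lo ≤ hi → hi ≤ cum.length →
    (∀ j, j < lo → cum.getD j 0 ≤ k) → (∀ j, hi ≤ j → j < cum.length → k < cum.getD j 0) →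
    (∀ j, j < pvBisB cum k lo hi → cum.getD j 0 ≤ k) ∧
    (∀ j, pvBisB cum k lo hi ≤ j → j < cum.length → k < cum.getD j 0) ∧
    pvBisB cum k lo hi ≤ cum.length := by
  suffices h : ∀ (n lo hi : Nat), hi - lo ≤ n → lo ≤ hi → hi ≤ cum.length →
      (∀ j, j < lo → cum.getD j 0 ≤ k) → (∀ j, hi ≤ j → j < cum.length → k < cum.getD j 0) →
      (∀ j, j < pvBisB cum k lo hi → cum.getD j 0 ≤ k) ∧
      (∀ j, pvBisB cum k lo hi ≤ j → j < cum.length → k < cum.getD j 0) ∧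
      pvBisB cum k lo hi ≤ cum.length by
    intro lo hi
    exact h (hi - lo) lo hi le_rfl
  intro n
  induction n with
  | zero =>
    intro lo hi hn hlo hhi hbelow habove
    have heq : ¬ lo < hi := by omega
    rw [pvBisB, dif_neg heq]
    exact ⟨fun j hj => hbelow j hj, fun j hj hjl => habove j (by omega) hjl, by omega⟩
  | succ n ih =>
    intro lo hi hn hlo hhi hbelow habove
    by_cases hlt : lo < hi
    · have hmidlt : (lo + hi) / 2 < cum.length := by omega
      rw [pvBisB, dif_pos hlt]
      by_cases hle : (PySem.List.pyGet? cum (((lo + hi) / 2 : Nat) : Int)).getD 0 ≤ k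
      · simp only [hle, if_pos]
        refine ih ((lo + hi) / 2 + 1) hi (by omega) (by omega) hhi ?_ habove
        intro j hj
        rcases Nat.lt_or_ge j lo with h | h
        · exact hbelow j h
        · calc cum.getD j 0 ≤ cum.getD ((lo + hi) / 2) 0 := mono j _ (by omega) hmidlt
            _ ≤ k := by
              rwa [PySem.List.pyGet?_natCast, ← List.getD_eq_getElem?_getD] at hle
      · simp only [hle]
        refine ih lo ((lo + hi) / 2) (by omega) (by omega) (by omega) hbelow ?_
        intro j hj hjlen
        calc k < cum.getD ((lo + hi) / 2) 0 := by
              rw [PySem.List.pyGet?_natCast, ← List.getD_eq_getElem?_getD] at hle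
              omega
          _ ≤ cum.getD j 0 := mono _ j hj hjlen
    · rw [pvBisB, dif_neg hlt]
      exact ⟨fun j hj => hbelow j hj, fun j hj hjl => habove j (by omega) hjl, by omega⟩

-- B's loop = one eager fold over ranked zipped with the slot list suffix from position k
theorem pvLoopB_eq (cum : List Int) (W : Int) (slots : List Int)
    (H1 : ∀ k : Nat, k < slots.length →
      ((pvBisB cum (k : Int) 0 cum.length : Int) ≤ W ∧
       slots.getD k 0 = (pvBisB cum (k : Int) 0 cum.length : Int)))
    (H2 : ∀ k : Nat, slots.length ≤ k → W < (pvBisB cum (k : Int) 0 cum.length : Int)) :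
    ∀ (ranked : List (Int × Int)) (k : Nat) (elim : List Int),
    pvLoopB cum W ranked k elim =
      ((ranked.zip (slots.drop k)).foldl (fun e x => e.set x.1.2.toNat x.2) elim) := by
  intro ranked
  induction ranked with
  | nil => intro k elim; simp [pvLoopB]
  | cons pi rest ih =>
    intro k elim
    rcases Nat.lt_or_ge k slots.length with hk | hk
    · obtain ⟨hle, hval⟩ := H1 k hk
      rw [List.drop_eq_getElem_cons hk, List.zip_cons_cons, List.foldl_cons, pvLoopB]
      simp only [hle, if_pos]
      rw [ih (k + 1)]
      congr 1
      rw [List.getD_eq_getElem?_getD, List.getElem?_eq_getElem hk, Option.getD_some] at hval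
      rw [hval]
    · have hdrop : slots.drop k = [] := List.drop_eq_nil_of_le hk
      have hdrop' : slots.drop (k + 1) = [] := List.drop_eq_nil_of_le (by omega)
      rw [pvLoopB]
      simp only [not_le.mpr (H2 k hk)]
      rw [ih (k + 1), hdrop, hdrop']
      simp

-- zip against a split right-hand list: the tail pairs with the dropped prefix
theorem pv_zip_append_right {α β : Type} (as : List β) (xs : List α) (bs : List β) :
    xs.zip (as ++ bs) = xs.zip as ++ (xs.drop as.length).zip bs := by
  induction as generalizing xs with
  | nil => simp
  | cons a as ih =>
    cases xs with
    | nil => simp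
    | cons x xs => simp [ih]

-- A's inner loop = one fold over (ranked-suffix ⨯ replicated week), cursor advanced and clamped
theorem pv_innerA_eq (ranked : List (Int × Int)) (w : Int) (n : Nat) :
    ∀ (elim : List Int) (idx : Nat), idx ≤ ranked.length →
    pvInnerA ranked w n (elim, idx) =
      (((ranked.drop idx).zip (List.replicate n w)).foldl (fun e x => e.set x.1.2.toNat x.2) elim,
       min (idx + n) ranked.length) := by
  induction n with
  | zero => intro elim idx h; simp [pvInnerA]; omega
  | succ n ih =>
    intro elim idx h
    by_cases hge : idx ≥ ranked.length
    · have hidx : idx = ranked.length := le_antisymm h hge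
      simp [pvInnerA, hidx, List.drop_length]
    · have hlt : idx < ranked.length := lt_of_not_ge hge
      have hdrop : ranked.drop idx = ranked[idx] :: ranked.drop (idx + 1) :=
        (List.drop_eq_getElem_cons hlt)
      rw [pvInnerA]
      simp only [hge, if_false]
      rw [ih _ (idx + 1) (by omega), hdrop, List.replicate_succ]
      simp only [List.zip_cons_cons, List.foldl_cons, List.getD_eq_getElem?_getD,
        List.getElem?_eq_getElem hlt, Option.getD_some, Prod.mk.injEq]
      exact ⟨trivial, by omega⟩

-- A's week loop = one fold over ranked zipped with the flattened slots of the weeks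
theorem pv_outer_eq (ranked : List (Int × Int)) (cnt : Int → Nat) (L : List Int) :
    ∀ (elim : List Int) (idx : Nat), idx ≤ ranked.length →
    (L.foldl (fun st w => pvInnerA ranked w (cnt w) st) (elim, idx)).1 =
      ((ranked.drop idx).zip (L.flatMap (fun w => List.replicate (cnt w) w))).foldl
        (fun e x => e.set x.1.2.toNat x.2) elim := by
  induction L with
  | nil => intro elim idx h; simp
  | cons w L ih =>
    intro elim idx h
    rw [List.foldl_cons, pv_innerA_eq ranked w (cnt w) elim idx h,
      ih _ (min (idx + cnt w) ranked.length) (by omega),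
      List.flatMap_cons, pv_zip_append_right, List.foldl_append]
    congr 2
    rw [List.drop_drop, List.length_replicate]
    by_cases hle : cnt w + idx ≤ ranked.length
    · congr 1; omega
    · rw [List.drop_eq_nil_of_le (by omega), List.drop_eq_nil_of_le (by omega)]

-- ===== VERDICT (by name: the statement is the Claim_ definition above) =====
theorem infer_elim_week_from_placement_spec : Claim_equal_infer_elim_week_from_placement := by
  intro placement schedule _
  show _ = _
  unfold infer_elim_week_from_placement infer_elim_week_from_placement_alt
  simp only []
  set W : Int := (schedule.length : Int) - 1 with hW
  set ws := PySem.List.pyRange 1 (W + 1) 1 with hws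
  -- week-list facts
  have hwslen : ws.length = W.toNat := by
    rw [hws, PySem.List.length_pyRange_one]; congr 1; omega
  have hwsget : ∀ j : Nat, j < ws.length → ws.getD j 0 = 1 + (j : Int) := by
    intro j hj
    rw [List.getD_eq_getElem?_getD, List.getElem?_eq_getElem hj, Option.getD_some]
    simp only [hws, PySem.List.getElem_pyRange_one]
  -- cum facts
  have hcum : pvCumB schedule W = pvCums schedule ws 0 := pvCumB_eq_cums schedule W
  have hcumlen : (pvCumB schedule W).length = ws.length + 1 := by
    rw [hcum, pvCums_length]
  have hcumget : ∀ j : Nat, j ≤ ws.length →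
      (pvCumB schedule W).getD j 0 = (pvT schedule ws j : Int) := by
    intro j hj
    rw [hcum, pvCums_getD schedule ws 0 j hj, Int.zero_add]
  have hmono : ∀ i j : Nat, i ≤ j → j < (pvCumB schedule W).length →
      (pvCumB schedule W).getD i 0 ≤ (pvCumB schedule W).getD j 0 := by
    intro i j hij hj
    rw [hcumget i (by omega), hcumget j (by omega)]
    exact_mod_cast pvT_mono schedule ws hij
  -- slot facts
  have hslen : (pvSlots schedule ws).length = pvT schedule ws ws.length :=
    pvSlots_length schedule ws
  -- the binary search at position k: its three spec components
  have hbis : ∀ k : Nat,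
      (∀ j, j < pvBisB (pvCumB schedule W) (k : Int) 0 (pvCumB schedule W).length →
        (pvCumB schedule W).getD j 0 ≤ (k : Int)) ∧
      (∀ j, pvBisB (pvCumB schedule W) (k : Int) 0 (pvCumB schedule W).length ≤ j →
        j < (pvCumB schedule W).length → (k : Int) < (pvCumB schedule W).getD j 0) ∧
      pvBisB (pvCumB schedule W) (k : Int) 0 (pvCumB schedule W).length ≤ (pvCumB schedule W).length :=
    fun k => pvBisB_spec (pvCumB schedule W) (k : Int) hmono 0 (pvCumB schedule W).length
      (Nat.zero_le _) (le_refl _) (by omega) (by omega)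
  -- per-position facts H1 and H2 for pvLoopB_eq
  have H1 : ∀ k : Nat, k < (pvSlots schedule ws).length →
      ((pvBisB (pvCumB schedule W) (k : Int) 0 (pvCumB schedule W).length : Int) ≤ W ∧
       (pvSlots schedule ws).getD k 0 =
         (pvBisB (pvCumB schedule W) (k : Int) 0 (pvCumB schedule W).length : Int)) := by
    intro k hk
    obtain ⟨hA, hB, hC⟩ := hbis k
    set R := pvBisB (pvCumB schedule W) (k : Int) 0 (pvCumB schedule W).length with hR
    -- 1 ≤ R: cum[0] = 0 ≤ k
    have hR1 : 1 ≤ R := by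
      by_contra h
      have hR0 : R = 0 := by omega
      have := hB 0 (by omega) (by omega)
      rw [hcumget 0 (by omega)] at this
      simp [pvT_zero] at this
      omega
    -- R ≤ ws.length: otherwise the whole capacity is ≤ k, contradicting k < slots.length
    have hRle : R ≤ ws.length := by
      by_contra h
      have := hA ws.length (by omega)
      rw [hcumget ws.length (le_refl _)] at this
      rw [hslen] at hk
      omega
    -- cum[R-1] ≤ k < cum[R] gives the block of week R-1
    have hlow : pvT schedule ws (R - 1) ≤ k := by
      have := hA (R - 1) (by omega)
      rw [hcumget (R - 1) (by omega)] at this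
      exact_mod_cast this
    have hhigh : (k : Nat) < pvT schedule ws R := by
      have := hB R (le_refl _) (by omega)
      rw [hcumget R hRle] at this
      exact_mod_cast this
    have hTsucc : pvT schedule ws R = pvT schedule ws (R - 1) + pvCnt schedule (ws.getD (R - 1) 0) := by
      have := pvT_succ schedule ws (R - 1) (by omega)
      rwa [Nat.sub_add_cancel hR1] at this
    have hd : k - pvT schedule ws (R - 1) < pvCnt schedule (ws.getD (R - 1) 0) := by omega
    have hget := pvSlots_getD schedule ws (R - 1) (k - pvT schedule ws (R - 1)) (by omega) hd
    rw [Nat.add_sub_cancel' hlow] at hget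
    have hweek : ws.getD (R - 1) 0 = (R : Int) := by
      rw [hwsget (R - 1) (by omega)]
      omega
    constructor
    · -- R ≤ ws.length = W.toNat, and W ≥ 0 since ws ≠ []
      have hWpos : 0 ≤ W := by
        by_contra h
        have : ws.length = 0 := by omega
        omega
      omega
    · rw [hget, hweek]
  have H2 : ∀ k : Nat, (pvSlots schedule ws).length ≤ k →
      W < (pvBisB (pvCumB schedule W) (k : Int) 0 (pvCumB schedule W).length : Int) := by
    intro k hk
    obtain ⟨hA, hB, hC⟩ := hbis k
    set R := pvBisB (pvCumB schedule W) (k : Int) 0 (pvCumB schedule W).length with hR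
    -- every cum entry is ≤ k, so R must be the full length
    have hfull : R = (pvCumB schedule W).length := by
      by_contra h
      have hlt := hB R (le_refl _) (by omega)
      rw [hcumget R (by omega)] at hlt
      have hle : pvT schedule ws R ≤ pvT schedule ws ws.length := pvT_mono schedule ws (by omega)
      rw [hslen] at hk
      omega
    rw [hfull, hcumlen, hwslen]
    omega
  -- assemble: both sides are the same fold over ranked.zip(slots)
  rw [pvLoopB_eq (pvCumB schedule W) W (pvSlots schedule ws) H1 H2 _ 0, List.drop_zero,
    pv_outer_eq _ (fun w => ((if w < (schedule.length : Int) then (PySem.List.pyGet? schedule w).getD 0 else 0)).toNat) _ _ 0 (Nat.zero_le _), List.drop_zero]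
  congr 2
  unfold pvSlots
  apply List.flatMap_congr
  intro w hw
  have hmem := (PySem.List.mem_pyRange_one).1 (by rwa [hws] at hw)
  have hlt : w < (schedule.length : Int) := by omega
  simp only [hlt, if_true, pvCnt]
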